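-- pv_equiv track=rewrite | github.com/KINSHU07/DSA-WITH-CPP | c++/cpp/1.py | get_max_clean
-- ===== SOURCE A (Python) =====
-- def get_max_clean(N, S):
--     ans = 0
--     i = 0
--
--     while i < N:
--         if S[i] == '0':
--             j = i
--             while j < N and S[j] == '0':
--                 j += 1
--
--             # zero block must be surrounded by '1'
--             if i > 0 and j < N and S[i - 1] == '1' and S[j] == '1':
--                 length = j - i
--                 ans += (length + 1) // 2
--
--             i = j
--         else:
--             i += 1
--
--     return ans
-- ===== SOURCE B (Python) =====
-- def get_max_clean(N, S):
--     parts = S[:max(0, N)].split('1')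
--     return sum((len(p) + 1) // 2
--                for p in parts[1:-1]
--                if all(c == '0' for c in p))
-- ===== Notes on version B (the rewrite author's own statement) =====
-- stated objective: simpler
-- what changed: Replaces the two-level index walk (outer scan plus inner zero-run loop with lookback/lookahead indexing) by a split-then-sum decomposition: split the first-N prefix on '1', and the interior pieces are exactly the candidate blocks, scored when they consist of zeros (constant-factor speedup from CPython's C-level str.split versus a per-character Python loop).
import Mathlib
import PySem

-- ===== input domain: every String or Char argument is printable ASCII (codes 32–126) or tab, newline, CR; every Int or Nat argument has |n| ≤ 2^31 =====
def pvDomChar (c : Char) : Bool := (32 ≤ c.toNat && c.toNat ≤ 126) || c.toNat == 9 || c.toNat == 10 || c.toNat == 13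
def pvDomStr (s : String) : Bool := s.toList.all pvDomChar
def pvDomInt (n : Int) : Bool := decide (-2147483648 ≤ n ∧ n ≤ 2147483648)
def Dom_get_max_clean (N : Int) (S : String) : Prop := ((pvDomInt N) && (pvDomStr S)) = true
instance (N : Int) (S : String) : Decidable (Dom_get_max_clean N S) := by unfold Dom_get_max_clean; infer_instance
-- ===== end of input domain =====

-- B replaces A's two-level index walk by split-on-'1' followed by one pass over the interior
-- pieces (objective: simpler). Equality of RETURN values is claimed on Pre_ (N ≤ len(S);
-- beyond that A raises IndexError, see Raises_).

-- B replaces A's two-level index walk by split-on-'1' plus one pass over the interior pieces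
-- (objective: simpler). Equal RETURN values are claimed on Pre_ (N ≤ len(S)); for N > len(S)
-- A raises IndexError (B's slice clamps and it returns a value there).

-- ===== PORT A =====
-- inner loop: `while j < N and S[j] == '0': j += 1`
def aZero (N : Int) (s : List Char) (j : Int) : Int :=
  if j < N ∧ PySem.List.pyGet? s j = some '0' then aZero N s (j + 1) else j
termination_by (N - j).toNat
decreasing_by omega

-- cited by aMain's decreasing_by: the inner loop never moves j backwards
theorem le_aZero (N : Int) (s : List Char) (j : Int) : j ≤ aZero N s j := by
  unfold aZero
  split
  · have := le_aZero N s (j + 1); omega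
  · exact le_refl j
termination_by (N - j).toNat
decreasing_by omega

-- outer loop: `while i < N: …`
def aMain (N : Int) (s : List Char) (i ans : Int) : Int :=
  if h : i < N then
    if h0 : PySem.List.pyGet? s i = some '0' then
      let j := aZero N s i
      have hj : i + 1 ≤ j := by
        have h1 : aZero N s i = aZero N s (i + 1) := by
          rw [aZero]; simp [h, h0]
        have := le_aZero N s (i + 1); omega
      let ans' := if 0 < i ∧ j < N ∧ PySem.List.pyGet? s (i - 1) = some '1' ∧
                     PySem.List.pyGet? s j = some '1'
                  then ans + PySem.Int.floordiv ((j - i) + 1) 2 else ans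
      aMain N s j ans'
    else aMain N s (i + 1) ans
  else ans
termination_by (N - i).toNat
decreasing_by all_goals omega

def get_max_clean (N : Int) (S : String) : Int := aMain N S.toList 0 0

-- ===== PORT B =====
-- parts = S[:max(0, N)].split('1'); sum((len(p)+1)//2 for p in parts[1:-1] if all(c == '0' for c in p))
def get_max_clean_alt (N : Int) (S : String) : Int :=
  let parts := PySem.Chars.splitOn (PySem.List.slice S.toList none (some (max 0 N))) ['1']
  (PySem.List.slice parts (some 1) (some (-1))).foldl
    (fun acc p => if p.all (fun c => c == '0')
                  then acc + PySem.Int.floordiv ((p.length : Int) + 1) 2 else acc) 0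

-- ===== PRECONDITION & SPEC =====
-- Pre_ excludes exactly the inputs on which A raises IndexError: N greater than len(S).
def Pre_get_max_clean (N : Int) (S : String) : Prop := N ≤ (S.toList.length : Int)
instance (N : Int) (S : String) : Decidable (Pre_get_max_clean N S) := by
  unfold Pre_get_max_clean; infer_instance
def pvWitness_get_max_clean : Int × String := (3, "101")

def Spec_get_max_clean (N : Int) (S : String) (out : Int) : Prop := out = get_max_clean_alt N S
instance (N : Int) (S : String) (out : Int) : Decidable (Spec_get_max_clean N S out) := by
  unfold Spec_get_max_clean; infer_instance

-- ===== CLAIM (what is proved, stated in full; the proofs are below) =====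
def Claim_equal_get_max_clean : Prop := ∀ (N : Int) (S : String), Dom_get_max_clean N S →
  Pre_get_max_clean N S → Spec_get_max_clean N S (get_max_clean N S)
-- ===== LEMMAS AND PROOFS =====

-- the one-pass state machine both ports are reduced to:
-- `armed` = previous char was '1'; `run` = length of the current zero run
def fsm (armed : Bool) (run : Int) : List Char → Int
  | [] => 0
  | c :: t =>
    if c = '0' then fsm armed (run + 1) t
    else (if armed = true ∧ c = '1' then PySem.Int.floordiv (run + 1) 2 else 0) +
         fsm (c == '1') 0 t

theorem fsm_zeros (zs : List Char) : ∀ (armed : Bool) (run : Int) (rest : List Char),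
    (∀ c ∈ zs, c = '0') → fsm armed run (zs ++ rest) = fsm armed (run + zs.length) rest := by
  induction zs with
  | nil => intro armed run rest _; simp
  | cons z zt ih =>
    intro armed run rest h
    have hz : z = '0' := h z (by simp)
    subst hz
    simp only [List.cons_append, fsm]
    rw [ih armed (run + 1) rest (fun c hc => h c (by simp [hc]))]
    have he : run + 1 + (zt.length : Int) = run + ((zt.length : Int) + 1) := by ring
    simp [he]

def KScore (run : Int) : List (List Char) → Int
  | [] => 0
  | [_] => 0
  | p :: q :: ps =>
      (if p.all (fun c => c == '0') then PySem.Int.floordiv (run + (p.length : Int) + 1) 2 else 0) +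
      KScore 0 (q :: ps)

theorem pySplitOn_go_eq (a : Char) (l : List Char) : ∀ (fuel : Nat) (cur : List Char)
    (acc : List (List Char)), l.length ≤ fuel →
    PySem.Chars.splitOn.go [a] fuel l cur acc =
      acc.reverse ++ List.modifyHead (cur.reverse ++ ·) (List.splitOn a l) := by
  induction l with
  | nil =>
    intro fuel cur acc _
    cases fuel <;> simp [PySem.Chars.splitOn.go, List.splitOn, List.splitOnP_nil]
  | cons c rest ih =>
    intro fuel cur acc hf
    simp only [List.length_cons] at hf
    cases fuel with
    | zero => omega
    | succ fuel =>
      simp only [PySem.Chars.splitOn.go]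
      obtain ⟨q, qs, hq⟩ := List.exists_cons_of_ne_nil (List.splitOnP_ne_nil (· == a) rest)
      have hq2 : List.splitOn a rest = q :: qs := by simpa [List.splitOn] using hq
      by_cases hc : c = a
      · subst hc
        have hpre : List.isPrefixOf [c] (c :: rest) = true := by
          simp [List.isPrefixOf]
        rw [if_pos hpre]
        have hd : List.drop [c].length (c :: rest) = rest := by simp
        rw [hd, ih fuel [] (cur.reverse :: acc) (by omega)]
        simp [List.splitOn, List.splitOnP_cons, hq]
      · have hpre : List.isPrefixOf [a] (c :: rest) = false := by
          simp [List.isPrefixOf]; exact fun h => (hc h.symm).elim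
        rw [if_neg (by simp [hpre])]
        rw [ih fuel (c :: cur) acc (by omega)]
        simp [List.splitOn, List.splitOnP_cons, hq, hc]

theorem pySplitOn_eq (a : Char) (l : List Char) :
    PySem.Chars.splitOn l [a] = List.splitOn a l := by
  unfold PySem.Chars.splitOn
  rw [pySplitOn_go_eq a l (l.length + 1) [] [] (by omega)]
  obtain ⟨q, qs, hq⟩ := List.exists_cons_of_ne_nil (List.splitOnP_ne_nil (· == a) l)
  have hq2 : List.splitOn a l = q :: qs := by simpa [List.splitOn] using hq
  simp [hq2]

theorem fsm_eq_KScore (t : List Char) : ∀ (armed : Bool) (run : Int),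
    fsm armed run t = if armed then KScore run (List.splitOn '1' t)
                      else KScore 0 ((List.splitOn '1' t).drop 1) := by
  induction t with
  | nil =>
    intro armed run
    cases armed <;> simp [fsm, List.splitOn, List.splitOnP_nil, KScore]
  | cons c t ih =>
    intro armed run
    obtain ⟨q, qs, hq⟩ := List.exists_cons_of_ne_nil (List.splitOnP_ne_nil (· == '1') t)
    have hq' : List.splitOn '1' t = q :: qs := by simpa [List.splitOn] using hq
    by_cases hc : c = '1'
    · subst hc
      have hs : List.splitOn '1' ('1' :: t) = [] :: q :: qs := by
        simp [List.splitOn, List.splitOnP_cons, hq]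
      rw [hs]
      cases armed <;>
        simp [fsm, ih, hq', KScore, PySem.Int.floordiv]
    · have hs : List.splitOn '1' (c :: t) = (c :: q) :: qs := by
        simp [List.splitOn, List.splitOnP_cons, hq, hc]
      rw [hs]
      by_cases h0 : c = '0'
      · subst h0
        cases armed
        · simp [fsm, ih, hq']
        · simp only [fsm, ih, hq']
          cases qs with
          | nil => simp [KScore]
          | cons r rs =>
            simp only [KScore]
            have hall : (('0' :: q).all fun c => c == '0') = (q.all fun c => c == '0') := by simp
            rw [hall]
            simp only [List.length_cons]
            push_cast
            rw [show run + (↑q.length + 1) + 1 = run + 1 + ↑q.length + 1 by ring]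
      · have hfsm : fsm armed run (c :: t) = fsm (c == '1') 0 t := by
          simp [fsm, h0, hc]
        have hcb : (c == '1') = false := by simp [hc]
        rw [hfsm, hcb, ih, if_neg (by simp)]
        have hall : ((c :: q).all fun x => x == '0') = false := by
          simp [List.all_cons, h0]
        rw [hq']
        cases qs with
        | nil => simp [KScore]
        | cons r rs => simp [KScore, hall]

theorem aZero_eq (N : Int) (l : List Char) : ∀ (j : Int), 0 ≤ j → j ≤ N →
    N ≤ (l.length : Int) →
    aZero N l j = j + (((l.take N.toNat).drop j.toNat).takeWhile (· == '0')).length := by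
  intro j
  induction j using aZero.induct N l with
  | case1 j h ih =>
    intro h0 hN hlen
    obtain ⟨hjN, hget⟩ := h
    have hj : l[j.toNat]? = some '0' := by
      rw [← Int.toNat_of_nonneg h0] at hget
      rwa [PySem.List.pyGet?_natCast] at hget
    have hjlt : j.toNat < (l.take N.toNat).length := by
      simp [List.length_take]; omega
    have hb : j.toNat < l.length := by omega
    have hget2 : (l.take N.toNat)[j.toNat]'hjlt = '0' := by
      have he : (l.take N.toNat)[j.toNat]'hjlt = l[j.toNat]'hb := List.getElem_take
      rw [he]
      simpa [List.getElem?_eq_getElem hb] using hj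
    have hdrop : (l.take N.toNat).drop j.toNat = '0' :: ((l.take N.toNat).drop (j.toNat + 1)) := by
      rw [List.drop_eq_getElem_cons hjlt, hget2]
    rw [aZero, if_pos ⟨hjN, hget⟩]
    rw [ih (by omega) (by omega) hlen]
    rw [hdrop]
    have h1 : (j + 1).toNat = j.toNat + 1 := by omega
    simp [List.takeWhile, h1]
    omega
  | case2 j h =>
    intro h0 hN hlen
    rw [aZero, if_neg h]
    rcases lt_or_ge j N with hjN | hjN
    · have hget : PySem.List.pyGet? l j ≠ some '0' := fun hc => h ⟨hjN, hc⟩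
      have hj : l[j.toNat]? ≠ some '0' := by
        rw [← Int.toNat_of_nonneg h0] at hget
        rwa [PySem.List.pyGet?_natCast] at hget
      have hjlt : j.toNat < (l.take N.toNat).length := by
        simp [List.length_take]; omega
      have hb : j.toNat < l.length := by omega
      have hne : ¬ ((l.take N.toNat)[j.toNat]'hjlt = '0') := by
        have he : (l.take N.toNat)[j.toNat]'hjlt = l[j.toNat]'hb := List.getElem_take
        rw [he]
        intro hc
        exact hj (by simp [List.getElem?_eq_getElem hb, hc])
      have hnel : ¬ (l[j.toNat]'hb = '0') := fun hc =>
        hj (by simp [List.getElem?_eq_getElem hb, hc])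
      rw [List.drop_eq_getElem_cons hjlt]
      have hbeq : (l[j.toNat]'hb == '0') = false := beq_eq_false_iff_ne.mpr hnel
      simp [List.takeWhile, hbeq]
    · have hd : (l.take N.toNat).drop j.toNat = [] := by
        apply List.drop_eq_nil_of_le
        simp [List.length_take]; omega
      simp [hd]

theorem aMain_eq (N : Int) (l : List Char) : ∀ (i ans : Int), 0 ≤ i → i ≤ N →
    N ≤ (l.length : Int) →
    aMain N l i ans = ans + fsm (decide (0 < i) && (PySem.List.pyGet? l (i - 1) == some '1')) 0
      ((l.take N.toNat).drop i.toNat) := by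
  intro i ans
  induction i, ans using aMain.induct N l with
  | case1 i ans hiN h0 j hjge ansP ih =>
    intro hi0 hiN' hlen
    have hT : (l.take N.toNat).drop i.toNat =
        ((l.take N.toNat).drop i.toNat).takeWhile (· == '0') ++
        ((l.take N.toNat).drop i.toNat).dropWhile (· == '0') :=
      List.takeWhile_append_dropWhile.symm
    have hz : ∀ c ∈ ((l.take N.toNat).drop i.toNat).takeWhile (· == '0'), c = '0' :=
      fun c hc => by have := List.mem_takeWhile_imp hc; simpa using this
    have hjz : j = i + ((((l.take N.toNat).drop i.toNat).takeWhile (· == '0')).length : Int) :=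
      aZero_eq N l i hi0 (by omega) hlen
    have hTlen : ((l.take N.toNat).drop i.toNat).length = N.toNat - i.toNat := by
      simp [List.length_take, List.length_drop]
      omega
    have htwle : (((l.take N.toNat).drop i.toNat).takeWhile (· == '0')).length ≤
        ((l.take N.toNat).drop i.toNat).length :=
      (List.takeWhile_prefix _).length_le
    have hjN : j ≤ N := by omega
    have hj0 : 0 ≤ j := by omega
    have hDdrop : ((l.take N.toNat).drop i.toNat).dropWhile (· == '0') =
        (l.take N.toNat).drop j.toNat := by
      have h1 : List.drop ((((l.take N.toNat).drop i.toNat).takeWhile (· == '0')).length)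
          ((((l.take N.toNat).drop i.toNat).takeWhile (· == '0')) ++
           (((l.take N.toNat).drop i.toNat).dropWhile (· == '0'))) =
          ((l.take N.toNat).drop i.toNat).dropWhile (· == '0') := List.drop_left
      rw [← hT] at h1
      rw [← h1, List.drop_drop]
      congr 1
      omega
    have hstep : aMain N l i ans = aMain N l j ansP := by
      rw [aMain]
      simp only [dif_pos hiN, dif_pos h0]
      rfl
    rw [hstep, ih hj0 hjN hlen]
    have hfz : fsm (decide (0 < i) && (PySem.List.pyGet? l (i - 1) == some '1')) 0
        ((l.take N.toNat).drop i.toNat) =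
        fsm (decide (0 < i) && (PySem.List.pyGet? l (i - 1) == some '1'))
          ((((l.take N.toNat).drop i.toNat).takeWhile (· == '0')).length : Int)
          ((l.take N.toNat).drop j.toNat) := by
      conv_lhs => rw [hT]
      rw [fsm_zeros _ _ _ _ hz, hDdrop]
      norm_num
    rw [hfz]
    -- now case on the rest
    cases hDc : (l.take N.toNat).drop j.toNat with
    | nil =>
      have hjN2 : ¬ j < N := by
        have : (l.take N.toNat).length ≤ j.toNat := by
          by_contra hcon
          rw [Nat.not_le] at hcon
          have := List.drop_eq_nil_iff.mp hDc
          omega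
        simp [List.length_take] at this
        omega
      have hansP : ansP = ans := by
        have hnc : ¬ (0 < i ∧ j < N ∧ PySem.List.pyGet? l (i - 1) = some '1' ∧
            PySem.List.pyGet? l j = some '1') := fun hcc => hjN2 hcc.2.1
        simp only [ansP, dif_neg hnc]
      rw [hansP]
      simp [fsm]
    | cons d D' =>
      have hjlt : j.toNat < (l.take N.toNat).length := by
        by_contra hcon
        rw [Nat.not_lt] at hcon
        rw [List.drop_eq_nil_of_le hcon] at hDc
        simp at hDc
      have hjN2 : j < N := by
        simp [List.length_take] at hjlt
        omega
      have hjl : j.toNat < l.length := by omega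
      have hdval : l[j.toNat]'hjl = d := by
        have h1 : (l.take N.toNat)[j.toNat]'hjlt = d := by
          have := List.drop_eq_getElem_cons hjlt
          rw [hDc] at this
          exact (List.cons.injEq .. ▸ this).1.symm
        rw [← h1]
        exact List.getElem_take.symm
      have hpgj : PySem.List.pyGet? l j = some d := by
        rw [← Int.toNat_of_nonneg hj0, PySem.List.pyGet?_natCast]
        simp [List.getElem?_eq_getElem hjl, hdval]
      have hdne : ¬ d = '0' := by
        have hw : ((l.take N.toNat).drop i.toNat).dropWhile (· == '0') ≠ [] := by
          rw [hDdrop, hDc]; simp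
        have h8 := List.head_dropWhile_not (· == '0') hw
        have h9 : (((l.take N.toNat).drop i.toNat).dropWhile (· == '0')).head? = some d := by
          rw [hDdrop, hDc]; rfl
        rw [List.head?_eq_some_head hw] at h9
        rw [Option.some_inj.mp h9] at h8
        simpa using h8
      -- previous char of j is '0' (the zero run is nonempty)
      have htwpos : 0 < (((l.take N.toNat).drop i.toNat).takeWhile (· == '0')).length := by
        omega
      have hprev : PySem.List.pyGet? l (j - 1) = some '0' := by
        have hk : (j - 1).toNat = i.toNat + ((((l.take N.toNat).drop i.toNat).takeWhile
            (· == '0')).length - 1) := by omega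
        have hkl : (j-1).toNat < l.length := by omega
        rw [← Int.toNat_of_nonneg (by omega : (0:Int) ≤ j - 1), PySem.List.pyGet?_natCast]
        rw [List.getElem?_eq_getElem hkl]
        congr 1
        -- l[(j-1).toNat] is inside the zero run
        have hidx : ((((l.take N.toNat).drop i.toNat).takeWhile (· == '0')).length - 1) <
            (((l.take N.toNat).drop i.toNat).takeWhile (· == '0')).length := by omega
        have hmem : (((l.take N.toNat).drop i.toNat).takeWhile (· == '0'))[
            (((l.take N.toNat).drop i.toNat).takeWhile (· == '0')).length - 1]'hidx ∈
            (((l.take N.toNat).drop i.toNat).takeWhile (· == '0')) := List.getElem_mem _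
        have h0mem := hz _ hmem
        rw [← h0mem]
        have hpref := List.takeWhile_prefix (l := (l.take N.toNat).drop i.toNat) (· == '0')
        have hgp := List.IsPrefix.getElem hpref hidx
        rw [hgp]
        simp only [List.getElem_drop, List.getElem_take]
        congr 1
      have harmj : (decide (0 < j) && (PySem.List.pyGet? l (j - 1) == some '1')) = false := by
        simp [hprev]
      rw [harmj]
      -- compute both sides
      simp only [fsm, if_neg hdne]
      have hansP : ansP = ans + (if (decide (0 < i) && (PySem.List.pyGet? l (i - 1) ==
          some '1')) = true ∧ d = '1' then PySem.Int.floordiv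
          (((((l.take N.toNat).drop i.toNat).takeWhile (· == '0')).length : Int) + 1) 2
          else 0) := by
        simp only [ansP]
        by_cases hcond : 0 < i ∧ j < N ∧ PySem.List.pyGet? l (i - 1) = some '1' ∧
            PySem.List.pyGet? l j = some '1'
        · rw [dif_pos hcond]
          have hd1 : d = '1' := by
            have h6 := hcond.2.2.2
            rw [hpgj] at h6
            exact Option.some_inj.mp h6
          rw [if_pos ⟨by simp [hcond.1, hcond.2.2.1], hd1⟩]
          congr 1
          congr 1
          omega
        · rw [dif_neg hcond]
          rw [if_neg]
          · ring
          · intro hcc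
            obtain ⟨harm, hd1⟩ := hcc
            simp only [Bool.and_eq_true, decide_eq_true_eq, beq_iff_eq] at harm
            exact hcond ⟨harm.1, hjN2, harm.2, by rw [hpgj, hd1]⟩
      rw [hansP]
      have hzero : (if (false : Bool) = true ∧ d = '1' then PySem.Int.floordiv (0 + 1) 2
          else 0) = 0 := by simp
      rw [hzero]
      ring
  | case2 i ans hiN h0 ih =>
    intro hi0 _ hlen
    have hil : i.toNat < l.length := by omega
    have hiT : i.toNat < (l.take N.toNat).length := by simp [List.length_take]; omega
    -- char at i
    have hc : ∃ c, l[i.toNat]? = some c := ⟨l[i.toNat]'hil, by simp [List.getElem?_eq_getElem hil]⟩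
    obtain ⟨c, hcget⟩ := hc
    have hpg : PySem.List.pyGet? l i = some c := by
      rw [← Int.toNat_of_nonneg hi0, PySem.List.pyGet?_natCast]; exact hcget
    have hcne : ¬ c = '0' := fun h => h0 (by rw [hpg, h])
    have hdrop : (l.take N.toNat).drop i.toNat = c :: ((l.take N.toNat).drop (i.toNat + 1)) := by
      rw [List.drop_eq_getElem_cons hiT]
      congr 1
      have he : (l.take N.toNat)[i.toNat]'hiT = l[i.toNat]'hil := List.getElem_take
      rw [he]
      simpa [List.getElem?_eq_getElem hil] using hcget
    rw [aMain]
    rw [dif_pos hiN, dif_neg h0]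
    rw [ih (by omega) (by omega) hlen]
    rw [hdrop]
    have h1 : (i + 1).toNat = i.toNat + 1 := by omega
    rw [h1]
    simp only [fsm, if_neg hcne]
    have harm : (decide (0 < i + 1) && (PySem.List.pyGet? l (i + 1 - 1) == some '1')) = (c == '1') := by
      have : i + 1 - 1 = i := by ring
      simp [this, hpg, (show 0 < i + 1 by omega)]
    rw [harm]
    have hadd : (if (decide (0 < i) && (PySem.List.pyGet? l (i - 1) == some '1')) = true ∧ c = '1'
        then PySem.Int.floordiv (0 + 1) 2 else 0) = 0 := by
      split <;> simp [PySem.Int.floordiv]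
    omega
  | case3 i ans hiN =>
    intro _ hiN' _
    have hieq : i = N := le_antisymm hiN' (by omega)
    rw [aMain, dif_neg hiN]
    have : (l.take N.toNat).drop i.toNat = [] := by
      apply List.drop_eq_nil_of_le
      simp [List.length_take, hieq]
    rw [this]
    simp [fsm]

theorem foldl_dropLast_eq_KScore (ps : List (List Char)) : ∀ (acc : Int),
    ps.dropLast.foldl
      (fun acc p => if p.all (fun c => c == '0')
                    then acc + PySem.Int.floordiv ((p.length : Int) + 1) 2 else acc) acc
    = acc + KScore 0 ps := by
  induction ps with
  | nil => intro acc; simp [KScore]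
  | cons p ps ih =>
    intro acc
    cases ps with
    | nil => simp [KScore]
    | cons q qs =>
      simp only [List.dropLast_cons₂, List.foldl_cons, ih, KScore]
      split <;> ring_nf

theorem slice_one_neg_one {α : Type} (xs : List α) :
    PySem.List.slice xs (some 1) (some (-1)) = xs.tail.dropLast := by
  simp [PySem.List.slice, PySem.List.clampIdx]
  rcases xs with _ | ⟨x, t⟩
  · simp
  · simp [List.dropLast_eq_take, List.tail]


-- ===== VERDICT (by name: the statement is the Claim_ definition above) =====
theorem get_max_clean_spec : Claim_equal_get_max_clean := by
  intro N S _ hpre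
  unfold Spec_get_max_clean get_max_clean get_max_clean_alt Pre_get_max_clean at *
  dsimp only
  rcases (by omega : 0 ≤ N ∨ N < 0) with hN | hN
  · -- 0 ≤ N ≤ len
    have hmax : max 0 N = N := max_eq_right hN
    rw [hmax, PySem.List.slice_to _ hN, pySplitOn_eq, slice_one_neg_one]
    have hA : aMain N S.toList 0 0 =
        0 + fsm (decide ((0:Int) < 0) && (PySem.List.pyGet? S.toList ((0:Int) - 1) == some '1')) 0
          ((S.toList.take N.toNat).drop (0:Int).toNat) :=
      aMain_eq N S.toList 0 0 (le_refl 0) hN hpre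
    have harm : (decide ((0:Int) < 0) && (PySem.List.pyGet? S.toList ((0:Int) - 1) == some '1'))
        = false := by simp
    rw [harm] at hA
    rw [hA, fsm_eq_KScore, if_neg (by simp)]
    rw [foldl_dropLast_eq_KScore]
    have ht : ∀ (xs : List (List Char)), xs.tail = xs.drop 1 := fun xs => by
      cases xs <;> simp
    rw [ht]
    simp
  · -- N < 0: both sides are 0
    have hmax : max 0 N = 0 := max_eq_left (by omega)
    rw [hmax, PySem.List.slice_to _ (le_refl 0)]
    simp only [Int.toNat_zero, List.take_zero]
    rw [pySplitOn_eq]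
    have h1 : List.splitOn '1' ([] : List Char) = [[]] := by
      simp [List.splitOn, List.splitOnP_nil]
    rw [h1, slice_one_neg_one]
    rw [aMain, dif_neg (by omega)]
    simp
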